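-- pv_equiv track=rewrite | github.com/t-0hmura/mlmm_toolkit | mlmm/energy_diagram.py | _collect_flag_values
-- ===== SOURCE A (Python) =====
-- from typing import List, Sequence
--
-- def _collect_flag_values(
--     argv: Sequence[str],
--     names: Sequence[str],
--     stop_flags: Sequence[str],
-- ) -> List[str]:
--     vals: List[str] = []
--     names_set = set(names)
--     stop_set = set(stop_flags)
--     i = 0
--     while i < len(argv):
--         tok = argv[i]
--         if tok in names_set:
--             j = i + 1
--             while j < len(argv) and argv[j] not in stop_set:
--                 vals.append(argv[j])
--                 j += 1
--             i = j
--         else: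
--             i += 1
--     return vals
-- ===== SOURCE B (Python) =====
-- from typing import List, Sequence
--
-- def _collect_flag_values(
--     argv: Sequence[str],
--     names: Sequence[str],
--     stop_flags: Sequence[str],
-- ) -> List[str]:
--     names_set = set(names)
--     stop_set = set(stop_flags)
--     vals: List[str] = []
--     collecting = False
--     for tok in argv:
--         if collecting:
--             if tok in stop_set:
--                 # the stop token ends the run, but restarts one if it is itself a name
--                 collecting = tok in names_set
--             else:
--                 vals.append(tok)
--         else:
--             collecting = tok in names_set
--     return vals
-- ===== Notes on version B (the rewrite author's own statement) =====
-- stated objective: simpler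
-- what changed: Replaced the index-driven nested while loops with a single for-loop over argv carrying one boolean 'collecting' state, so there is no index arithmetic or inner scan; a stop token re-arms collection when it is itself a name.
import Mathlib
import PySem

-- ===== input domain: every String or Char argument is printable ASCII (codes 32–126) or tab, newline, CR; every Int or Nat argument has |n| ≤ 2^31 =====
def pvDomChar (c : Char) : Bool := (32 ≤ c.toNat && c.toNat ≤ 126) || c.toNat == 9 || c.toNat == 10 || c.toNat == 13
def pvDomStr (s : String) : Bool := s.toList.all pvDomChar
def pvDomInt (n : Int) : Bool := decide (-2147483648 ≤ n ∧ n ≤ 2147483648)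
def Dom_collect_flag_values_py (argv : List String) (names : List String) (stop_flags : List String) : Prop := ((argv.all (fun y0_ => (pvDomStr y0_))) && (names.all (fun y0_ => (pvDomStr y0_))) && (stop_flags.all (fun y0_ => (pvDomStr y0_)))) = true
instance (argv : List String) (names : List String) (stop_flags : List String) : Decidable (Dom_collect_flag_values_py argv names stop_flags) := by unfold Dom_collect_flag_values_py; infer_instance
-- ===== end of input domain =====

-- B replaces A's index-driven nested while loops by a single pass with one boolean state (simpler); return values are identical.

-- ===== PORT A =====
-- inner while loop: 'while j < len(argv) and argv[j] not in stop_set: vals.append(argv[j]); j += 1'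
def pvAInner (argv : List String) (stopS : PySem.Set String) (j : Nat) (vals : List String) : Nat × List String :=
  if h : j < argv.length then
    if PySem.Set.contains stopS argv[j] = false then
      pvAInner argv stopS (j + 1) (vals ++ [argv[j]])
    else (j, vals)
  else (j, vals)
termination_by argv.length - j

-- termination fact for the outer loop ('i = j' never moves backwards); cited by decreasing_by
theorem pvAInner_fst_ge (argv : List String) (stopS : PySem.Set String) (j : Nat) (vals : List String) :
    j ≤ (pvAInner argv stopS j vals).1 := by
  fun_induction pvAInner argv stopS j vals with
  | case1 j vals h hc ih => omega
  | case2 => simp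
  | case3 => simp

-- outer while loop over i
def pvAOuter (argv : List String) (namesS stopS : PySem.Set String) (i : Nat) (vals : List String) : List String :=
  if h : i < argv.length then
    if PySem.Set.contains namesS argv[i] then
      let r := pvAInner argv stopS (i + 1) vals
      pvAOuter argv namesS stopS r.1 r.2
    else
      pvAOuter argv namesS stopS (i + 1) vals
  else vals
termination_by argv.length - i
decreasing_by
  · have := pvAInner_fst_ge argv stopS (i + 1) vals; omega
  · omega

def collect_flag_values_py (argv : List String) (names : List String) (stop_flags : List String) : List String :=
  pvAOuter argv (PySem.Set.ofList names) (PySem.Set.ofList stop_flags) 0 []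

-- ===== PORT B =====
def pvBStep (namesS stopS : PySem.Set String) (st : Bool × List String) (tok : String) : Bool × List String :=
  if st.1 then
    if PySem.Set.contains stopS tok then
      (PySem.Set.contains namesS tok, st.2)
    else
      (true, st.2 ++ [tok])
  else
    (PySem.Set.contains namesS tok, st.2)

def collect_flag_values_py_alt (argv : List String) (names : List String) (stop_flags : List String) : List String :=
  (argv.foldl (pvBStep (PySem.Set.ofList names) (PySem.Set.ofList stop_flags)) (false, [])).2

-- ===== PRECONDITION & SPEC =====
def Spec_collect_flag_values_py (argv : List String) (names : List String) (stop_flags : List String) (out : List String) : Prop := out = collect_flag_values_py_alt argv names stop_flags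
instance (argv : List String) (names : List String) (stop_flags : List String) (out : List String) : Decidable (Spec_collect_flag_values_py argv names stop_flags out) := by unfold Spec_collect_flag_values_py; infer_instance

-- ===== CLAIM (what is proved, stated in full; the proofs are below) =====
def Claim_equal_collect_flag_values_py : Prop := ∀ (argv : List String) (names : List String) (stop_flags : List String), Dom_collect_flag_values_py argv names stop_flags → Spec_collect_flag_values_py argv names stop_flags (collect_flag_values_py argv names stop_flags)

-- ===== LEMMAS AND PROOFS =====

-- Both 'not collecting' (A's outer loop at i) and 'collecting' (A's inner loop at i, then the
-- outer loop resuming where it stops) are B's fold over the suffix argv.drop i with the matching flag.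
theorem pvLoopEq (argv : List String) (namesS stopS : PySem.Set String) :
    ∀ (n i : Nat) (vals : List String), argv.length - i ≤ n →
      pvAOuter argv namesS stopS i vals
          = (List.foldl (pvBStep namesS stopS) (false, vals) (argv.drop i)).2
      ∧ pvAOuter argv namesS stopS (pvAInner argv stopS i vals).1 (pvAInner argv stopS i vals).2
          = (List.foldl (pvBStep namesS stopS) (true, vals) (argv.drop i)).2 := by
  intro n
  induction n with
  | zero =>
    intro i vals hle
    have hge : argv.length ≤ i := by omega
    have hdrop : argv.drop i = [] := List.drop_eq_nil_of_le hge
    have hnot : ¬ i < argv.length := by omega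
    rw [pvAInner, pvAOuter, hdrop]
    simp [hnot, pvAOuter]
  | succ n ih =>
    intro i vals hle
    by_cases h : i < argv.length
    · have hdrop : argv.drop i = argv[i] :: argv.drop (i + 1) :=
        (List.getElem_cons_drop h).symm
      have hrec : argv.length - (i + 1) ≤ n := by omega
      constructor
      · rw [pvAOuter, hdrop]
        simp only [h, dif_pos, List.foldl_cons, pvBStep]
        by_cases hn : PySem.Set.contains namesS argv[i]
        · simp only [hn, if_pos]
          exact (ih (i + 1) vals hrec).2
        · simp only [hn, Bool.false_eq_true, if_false]
          exact (ih (i + 1) vals hrec).1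
      · rw [pvAInner]
        simp only [h, dif_pos]
        by_cases hs : PySem.Set.contains stopS argv[i]
        · -- inner loop stops at i; the outer loop re-examines argv[i]
          simp only [hs, Bool.true_eq_false, if_false]
          rw [pvAOuter, hdrop]
          simp only [h, dif_pos, List.foldl_cons, pvBStep, if_pos, hs]
          by_cases hn : PySem.Set.contains namesS argv[i]
          · simp only [hn, if_pos]
            exact (ih (i + 1) vals hrec).2
          · simp only [hn, Bool.false_eq_true, if_false]
            exact (ih (i + 1) vals hrec).1
        · -- the inner loop appends argv[i] and advances
          have hs' : PySem.Set.contains stopS argv[i] = false := by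
            simpa using hs
          rw [hdrop]
          simp only [hs', List.foldl_cons, pvBStep, if_true, Bool.false_eq_true, if_false]
          exact (ih (i + 1) (vals ++ [argv[i]]) hrec).2
    · have hdrop : argv.drop i = [] := List.drop_eq_nil_of_le (by omega)
      rw [pvAInner, pvAOuter, hdrop]
      simp [h, pvAOuter]

-- ===== VERDICT (by name: the statement is the Claim_ definition above) =====
theorem collect_flag_values_py_spec : Claim_equal_collect_flag_values_py := by
  intro argv names stop_flags _
  unfold Spec_collect_flag_values_py collect_flag_values_py collect_flag_values_py_alt
  have h := (pvLoopEq argv (PySem.Set.ofList names) (PySem.Set.ofList stop_flags)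
      argv.length 0 [] (by omega)).1
  simpa using h
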